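-- pv_equiv track=rewrite | github.com/cjulliar/home | npuzzle/sample/parser.py | delete_comments
-- ===== SOURCE A (Python) =====
-- def delete_comments(tokens):
-- 	"""Delete all comments"""
-- 	tab = []
-- 	for token in tokens:
-- 		line = []
-- 		exit = False
-- 		for caracs in token:
-- 			word = ""
-- 			if exit: break
-- 			for carac in caracs:
-- 				if (carac == '#'):
-- 					exit = True
-- 					break
-- 				word = word + carac
-- 			if word:
-- 				line.append(word)
-- 		if line:
-- 			tab.append(line)
--
--
-- 	tokens = [x for x in tab if x != ['']]
--
-- 	return (tokens)
-- ===== SOURCE B (Python) =====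
-- def delete_comments(tokens):
-- 	"""Delete all comments"""
-- 	def clean(token):
-- 		line = []
-- 		for w in token:
-- 			before, sep, _ = w.partition('#')
-- 			if before:
-- 				line.append(before)
-- 			if sep:
-- 				break
-- 		return line
-- 	return [line for line in map(clean, tokens) if line]
-- ===== Notes on version B (the rewrite author's own statement) =====
-- stated objective: idiomatic
-- what changed: Replaces the hand-written character loop and the cross-word 'exit' flag with str.partition('#') per word and a direct break, collecting cleaned lines in one comprehension (the redundant final [''] filter disappears).
import Mathlib
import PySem

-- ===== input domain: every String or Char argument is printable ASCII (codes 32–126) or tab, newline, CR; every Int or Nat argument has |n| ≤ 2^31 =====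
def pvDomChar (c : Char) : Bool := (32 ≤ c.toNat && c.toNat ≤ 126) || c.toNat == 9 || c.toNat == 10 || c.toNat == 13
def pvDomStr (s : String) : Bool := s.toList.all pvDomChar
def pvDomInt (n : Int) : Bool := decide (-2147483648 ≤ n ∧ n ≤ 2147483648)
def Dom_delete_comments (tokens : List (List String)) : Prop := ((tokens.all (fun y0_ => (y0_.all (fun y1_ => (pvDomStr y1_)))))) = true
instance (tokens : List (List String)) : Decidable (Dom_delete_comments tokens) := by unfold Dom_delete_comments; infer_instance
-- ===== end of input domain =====

-- B replaces A's per-character loop and cross-word exit flag with a per-word partition at '#'; idiomatic, same cost.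

-- ===== PORT A =====
-- inner 'for carac in caracs' loop: accumulates word, stops with exit=True at '#'
def innerA : List Char → String → String × Bool
  | [], word => (word, false)
  | c :: cs, word => if c = '#' then (word, true) else innerA cs (word.push c)

-- middle 'for caracs in token' loop with the exit flag and line accumulator
def lineA : List String → Bool → List String → List String
  | [], _, line => line
  | w :: ws, ex, line =>
    if ex then line
    else
      let r := innerA w.toList ""
      lineA ws r.2 (if r.1 ≠ "" then line ++ [r.1] else line)

def delete_comments (tokens : List (List String)) : List (List String) :=
  let tab := tokens.foldl (fun tab token =>
    let line := lineA token false []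
    if line ≠ [] then tab ++ [line] else tab) []
  tab.filter (fun x => x ≠ [""])

-- ===== PORT B =====
-- w.partition('#') : (part before '#', whether '#' occurs)
def partHash (s : String) : String × Bool :=
  (String.ofList (s.toList.takeWhile (fun c => c ≠ '#')), s.toList.contains '#')

-- B's per-line loop with break
def cleanLine : List String → List String
  | [] => []
  | w :: ws =>
    let p := partHash w
    let acc := if p.1 ≠ "" then [p.1] else []
    if p.2 then acc else acc ++ cleanLine ws

def delete_comments_alt (tokens : List (List String)) : List (List String) :=
  (tokens.map cleanLine).filter (fun line => line ≠ [])

-- ===== PRECONDITION & SPEC =====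
def Spec_delete_comments (tokens : List (List String)) (out : List (List String)) : Prop := out = delete_comments_alt tokens
instance (tokens : List (List String)) (out : List (List String)) : Decidable (Spec_delete_comments tokens out) := by unfold Spec_delete_comments; infer_instance

-- ===== CLAIM (what is proved, stated in full; the proofs are below) =====
def Claim_equal_delete_comments : Prop := ∀ (tokens : List (List String)), Dom_delete_comments tokens → Spec_delete_comments tokens (delete_comments tokens)

-- ===== LEMMAS AND PROOFS =====

theorem push_append_ofList (w : String) (c : Char) (l : List Char) :
    w.push c ++ String.ofList l = w ++ String.ofList (c :: l) := by
  rw [← String.toList_inj]; simp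

theorem innerA_eq (cs : List Char) (w : String) :
    innerA cs w = (w ++ String.ofList (cs.takeWhile (fun c => c ≠ '#')), cs.contains '#') := by
  induction cs generalizing w with
  | nil =>
    have h1 : w ++ String.ofList ([] : List Char) = w := by rw [← String.toList_inj]; simp
    simp [innerA, h1]
  | cons c cs ih =>
    by_cases h : c = '#'
    · subst h
      have h1 : w ++ String.ofList ([] : List Char) = w := by rw [← String.toList_inj]; simp
      simp [innerA, h1]
    · simp only [innerA, if_neg h, ih, push_append_ofList, Prod.mk.injEq]
      constructor
      · rw [List.takeWhile_cons]; simp [h]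
      · simp
        intro hc; exact absurd hc.symm h

theorem lineA_true (ws : List String) (line : List String) : lineA ws true line = line := by
  cases ws <;> simp [lineA]

theorem lineA_eq (ws : List String) (line : List String) :
    lineA ws false line = line ++ cleanLine ws := by
  induction ws generalizing line with
  | nil => simp [lineA, cleanLine]
  | cons w ws ih =>
    simp only [lineA, cleanLine, Bool.false_eq_true, if_false, innerA_eq, partHash]
    set b := String.ofList (w.toList.takeWhile (fun c => c ≠ '#')) with hb
    have hpre : ("" : String) ++ b = b := by rw [← String.toList_inj]; simp
    rw [hpre]
    by_cases hf : (w.toList.contains '#') = true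
    · simp only [hf, if_true, lineA_true]
      by_cases hbe : b = "" <;> simp [hbe]
    · simp only [Bool.not_eq_true] at hf
      simp only [hf, Bool.false_eq_true, if_false, ih]
      by_cases hbe : b = "" <;> simp [hbe]

theorem empty_notMem_branch (s : String) (b : Bool) (rest : List String)
    (h : "" ∉ rest) :
    "" ∉ (if b then (if s ≠ "" then [s] else [])
          else (if s ≠ "" then [s] else []) ++ rest) := by
  by_cases hs : s = ""
  · cases b <;> simp [hs, h]
  · cases b <;> simp [hs, h]

theorem cleanLine_no_empty (ws : List String) : "" ∉ cleanLine ws := by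
  induction ws with
  | nil => simp [cleanLine]
  | cons w ws ih => exact empty_notMem_branch (partHash w).1 (partHash w).2 _ ih

theorem foldl_tab (tokens : List (List String)) (acc : List (List String)) :
    tokens.foldl (fun tab token =>
      if cleanLine token ≠ [] then tab ++ [cleanLine token] else tab) acc
    = acc ++ (tokens.map cleanLine).filter (fun line => line ≠ []) := by
  induction tokens generalizing acc with
  | nil => simp
  | cons t ts ih =>
    rw [List.foldl_cons]
    by_cases h : cleanLine t = []
    · rw [if_neg (by simp [h]), ih, List.map_cons, List.filter_cons]
      simp [h]
    · rw [if_pos (by simp [h]), ih, List.map_cons, List.filter_cons]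
      simp [h]

-- ===== VERDICT (by name: the statement is the Claim_ definition above) =====
theorem delete_comments_spec : Claim_equal_delete_comments := by
  intro tokens _
  show delete_comments tokens = delete_comments_alt tokens
  unfold delete_comments delete_comments_alt
  have hf : (fun tab token =>
      let line := lineA token false []
      if line ≠ [] then tab ++ [line] else tab)
      = (fun (tab : List (List String)) (token : List String) =>
      if cleanLine token ≠ [] then tab ++ [cleanLine token] else tab) := by
    funext tab token
    simp [lineA_eq]
  rw [hf, foldl_tab]
  simp only [List.nil_append]
  rw [List.filter_eq_self.2]
  intro x hx
  have hmem := (List.mem_filter.1 hx).1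
  obtain ⟨t, _, rfl⟩ := List.mem_map.1 hmem
  have h := cleanLine_no_empty t
  simp only [ne_eq, decide_eq_true_eq]
  intro he
  rw [he] at h
  simp at h
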